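-- pv_equiv track=rewrite | github.com/ayanalamMOON/LeetCodeProblemSolutions | Daily_Problems/DailyProblem5/InPython.py | differenceOfSums_bruteforce
-- ===== SOURCE A (Python) =====
-- def differenceOfSums_bruteforce(n: int, m: int) -> int:
--     """
--     Brute Force Approach - O(n) time, O(1) space
--     """
--     num1 = 0  # sum of numbers not divisible by m
--     num2 = 0  # sum of numbers divisible by m
--
--     for i in range(1, n + 1):
--         if i % m == 0:
--             num2 += i
--         else:
--             num1 += i
--
--     return num1 - num2
-- ===== SOURCE B (Python) =====
-- def differenceOfSums_bruteforce(n: int, m: int) -> int: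
--     """
--     Closed form - O(1) time, O(1) space.
--     Sum of 1..n minus twice the sum of the multiples of m in 1..n,
--     via Gauss's formula and the count k = n // |m| of such multiples.
--     """
--     if n < 1:
--         return 0
--     total = n * (n + 1) // 2
--     d = m if m > 0 else -m
--     k = n // d
--     return total - d * k * (k + 1)
-- ===== Notes on version B (the rewrite author's own statement) =====
-- stated objective: faster
-- what changed: Replaced the O(n) loop over range(1, n+1) with a closed-form Gauss formula: total triangular sum minus twice the arithmetic-series sum of the k = n//|m| multiples of m.
import Mathlib
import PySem

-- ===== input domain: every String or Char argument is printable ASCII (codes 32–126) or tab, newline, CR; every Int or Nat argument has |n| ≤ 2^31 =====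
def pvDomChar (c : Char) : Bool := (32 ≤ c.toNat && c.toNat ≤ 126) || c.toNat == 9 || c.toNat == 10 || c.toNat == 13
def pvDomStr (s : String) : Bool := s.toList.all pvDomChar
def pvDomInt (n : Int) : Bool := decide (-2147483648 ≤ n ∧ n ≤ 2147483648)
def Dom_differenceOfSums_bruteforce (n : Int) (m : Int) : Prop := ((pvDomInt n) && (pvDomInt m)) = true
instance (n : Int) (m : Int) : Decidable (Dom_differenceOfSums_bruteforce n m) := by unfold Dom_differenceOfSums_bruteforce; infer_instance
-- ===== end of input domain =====

-- B replaces A's O(n) loop by the O(1) closed-form Gauss formula (count of multiples k = n // |m|).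

-- ===== PORT A =====
def differenceOfSums_bruteforce (n : Int) (m : Int) : Int :=
  let st := (PySem.List.pyRange 1 (n + 1) 1).foldl
    (fun (p : Int × Int) i =>
      if PySem.Int.mod i m = 0 then (p.1, p.2 + i) else (p.1 + i, p.2)) (0, 0)
  st.1 - st.2

-- ===== PORT B =====
def differenceOfSums_bruteforce_alt (n : Int) (m : Int) : Int :=
  if n < 1 then 0
  else
    let total := PySem.Int.floordiv (n * (n + 1)) 2
    let d := if m > 0 then m else -m
    let k := PySem.Int.floordiv n d
    total - d * k * (k + 1)

-- ===== PRECONDITION & SPEC =====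
-- Pre_ excludes exactly the inputs where Python A raises ZeroDivisionError: m = 0 with a non-empty loop (n ≥ 1).
def Pre_differenceOfSums_bruteforce (n : Int) (m : Int) : Prop := m ≠ 0 ∨ n < 1
instance (n : Int) (m : Int) : Decidable (Pre_differenceOfSums_bruteforce n m) := by unfold Pre_differenceOfSums_bruteforce; infer_instance
def pvWitness_differenceOfSums_bruteforce : Int × Int := (10, 3)

def Spec_differenceOfSums_bruteforce (n : Int) (m : Int) (out : Int) : Prop := out = differenceOfSums_bruteforce_alt n m
instance (n : Int) (m : Int) (out : Int) : Decidable (Spec_differenceOfSums_bruteforce n m out) := by unfold Spec_differenceOfSums_bruteforce; infer_instance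

-- ===== CLAIM (what is proved, stated in full; the proofs are below) =====
def Claim_equal_differenceOfSums_bruteforce : Prop := ∀ (n : Int) (m : Int), Dom_differenceOfSums_bruteforce n m → Pre_differenceOfSums_bruteforce n m → Spec_differenceOfSums_bruteforce n m (differenceOfSums_bruteforce n m)

-- ===== LEMMAS AND PROOFS =====

-- triangular numbers: floordiv (a*(a+1)) 2 is exact
lemma tri_eq (a t : Int) (h : a * (a + 1) = 2 * t) : PySem.Int.floordiv (a * (a + 1)) 2 = t := by
  rw [h, (PySem.Int.floordiv_eq_iff_of_pos (by norm_num)).2]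
  omega

lemma tri_exists (a : Int) : ∃ t, a * (a + 1) = 2 * t := by
  rcases Int.even_mul_succ_self a with ⟨t, ht⟩
  exact ⟨t, by omega⟩

-- main induction: for d > 0 and natural N, the loop's difference equals the closed form
lemma fold_closed (d : Int) (hd : 0 < d) (N : ℕ) :
    ((PySem.List.pyRange 1 ((N : Int) + 1) 1).foldl
      (fun (p : Int × Int) i =>
        if PySem.Int.mod i d = 0 then (p.1, p.2 + i) else (p.1 + i, p.2)) (0, 0)).1
    - ((PySem.List.pyRange 1 ((N : Int) + 1) 1).foldl
      (fun (p : Int × Int) i =>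
        if PySem.Int.mod i d = 0 then (p.1, p.2 + i) else (p.1 + i, p.2)) (0, 0)).2
    = PySem.Int.floordiv ((N : Int) * ((N : Int) + 1)) 2
      - d * (PySem.Int.floordiv (N : Int) d) * (PySem.Int.floordiv (N : Int) d + 1) := by
  induction N with
  | zero =>
      have h0 : PySem.List.pyRange 1 (((0 : ℕ) : Int) + 1) 1 = [] := by
        rw [show (((0 : ℕ) : Int) + 1) = 1 by norm_num]
        exact PySem.List.pyRange_one_eq_nil (by norm_num)
      have h2 : PySem.Int.floordiv (((0 : ℕ) : Int) * (((0 : ℕ) : Int) + 1)) 2 = 0 :=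
        (PySem.Int.floordiv_eq_iff_of_pos (by norm_num)).2 (by norm_num)
      have hD : PySem.Int.floordiv ((0 : ℕ) : Int) d = 0 :=
        (PySem.Int.floordiv_eq_iff_of_pos hd).2 (by push_cast; omega)
      rw [h0, h2, hD]
      simp
  | succ N ih =>
      have hsplit : PySem.List.pyRange 1 (((N + 1 : ℕ) : Int) + 1) 1
          = PySem.List.pyRange 1 ((N : Int) + 1) 1 ++ [(N : Int) + 1] := by
        have h := PySem.List.pyRange_one_succ_right (a := 1) (b := (N : Int) + 1) (by omega)
        push_cast
        exact h
      simp only [hsplit, List.foldl_append, List.foldl_cons, List.foldl_nil]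
      set p := (PySem.List.pyRange 1 ((N : Int) + 1) 1).foldl
        (fun (p : Int × Int) i =>
          if PySem.Int.mod i d = 0 then (p.1, p.2 + i) else (p.1 + i, p.2)) (0, 0) with hp
      set k' := PySem.Int.floordiv ((N : Int) + 1) d with hk'
      have hb : k' * d ≤ (N : Int) + 1 ∧ (N : Int) + 1 < (k' + 1) * d :=
        (PySem.Int.floordiv_eq_iff_of_pos hd).1 hk'.symm
      obtain ⟨t, ht⟩ := tri_exists (N : Int)
      have hT1 : PySem.Int.floordiv ((N : Int) * ((N : Int) + 1)) 2 = t := tri_eq _ _ ht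
      have hT2 : PySem.Int.floordiv (((N + 1 : ℕ) : Int) * (((N + 1 : ℕ) : Int) + 1)) 2
          = t + ((N : Int) + 1) := by
        apply tri_eq; push_cast; nlinarith [ht]
      by_cases hdvd : d ∣ (N : Int) + 1
      · obtain ⟨q, hq⟩ := hdvd
        have hk'q : k' = q := by
          rw [hk']
          exact (PySem.Int.floordiv_eq_iff_of_pos hd).2 ⟨by nlinarith [hq], by nlinarith [hq]⟩
        have hkN : PySem.Int.floordiv (N : Int) d = q - 1 :=
          (PySem.Int.floordiv_eq_iff_of_pos hd).2 ⟨by nlinarith [hq], by nlinarith [hq]⟩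
        have hmod : PySem.Int.mod ((N : Int) + 1) d = 0 :=
          (PySem.Int.mod_eq_zero_iff_dvd _ _).2 ⟨q, hq⟩
        simp only [hmod, if_pos]
        have hih : p.1 - p.2 = t - d * (q - 1) * (q - 1 + 1) := by
          rw [hp, ih, hT1, hkN]
        have hfold : PySem.Int.floordiv (((N + 1 : ℕ) : Int)) d = k' := by
          rw [hk']; push_cast; ring_nf
        rw [show (((N + 1 : ℕ) : Int)) = (N : Int) + 1 by push_cast; ring] at hT2 ⊢
        rw [← hk', hT2, hk'q]
        linear_combination hih - 2 * hq
      · have hne : k' * d ≠ (N : Int) + 1 := by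
          intro h; exact hdvd ⟨k', by rw [← h]; ring⟩
        have hk'N : PySem.Int.floordiv (N : Int) d = k' :=
          (PySem.Int.floordiv_eq_iff_of_pos hd).2 ⟨by omega, by omega⟩
        have hmod : ¬ PySem.Int.mod ((N : Int) + 1) d = 0 := by
          intro h; exact hdvd ((PySem.Int.mod_eq_zero_iff_dvd _ _).1 h)
        simp only [hmod, if_false]
        have hih : p.1 - p.2 = t - d * k' * (k' + 1) := by
          rw [hp, ih, hT1, hk'N]
        rw [show (((N + 1 : ℕ) : Int)) = (N : Int) + 1 by push_cast; ring] at hT2 ⊢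
        rw [← hk', hT2]
        linarith [hih]

-- the loop body only depends on |m|:
lemma mod_abs (i m : Int) :
    (PySem.Int.mod i m = 0) ↔ (PySem.Int.mod i (if m > 0 then m else -m) = 0) := by
  rw [PySem.Int.mod_eq_zero_iff_dvd, PySem.Int.mod_eq_zero_iff_dvd]
  split_ifs with h
  · exact Iff.rfl
  · exact (neg_dvd (α := ℤ)).symm

-- ===== VERDICT (by name: the statement is the Claim_ definition above) =====
theorem differenceOfSums_bruteforce_spec : Claim_equal_differenceOfSums_bruteforce := by
  intro n m _ hpre
  unfold Spec_differenceOfSums_bruteforce differenceOfSums_bruteforce differenceOfSums_bruteforce_alt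
  by_cases hn : n < 1
  · simp [PySem.List.pyRange_one_eq_nil (by omega : n + 1 ≤ 1), hn]
  · have hm : m ≠ 0 := hpre.resolve_right hn
    have hd : 0 < (if m > 0 then m else -m) := by split_ifs with h <;> omega
    rw [if_neg hn]
    obtain ⟨N, hN⟩ : ∃ N : ℕ, n = (N : Int) := ⟨n.toNat, by omega⟩
    subst hN
    have hcong : (PySem.List.pyRange 1 ((N : Int) + 1) 1).foldl
        (fun (p : Int × Int) i =>
          if PySem.Int.mod i m = 0 then (p.1, p.2 + i) else (p.1 + i, p.2)) (0, 0)
        = (PySem.List.pyRange 1 ((N : Int) + 1) 1).foldl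
        (fun (p : Int × Int) i =>
          if PySem.Int.mod i (if m > 0 then m else -m) = 0 then (p.1, p.2 + i) else (p.1 + i, p.2)) (0, 0) := by
      apply PySem.List.foldl_congr_mem
      intro p i _
      by_cases h : PySem.Int.mod i m = 0
      · rw [if_pos h, if_pos ((mod_abs i m).1 h)]
      · rw [if_neg h, if_neg (fun hc => h ((mod_abs i m).2 hc))]
    simp only [hcong]
    exact fold_closed _ hd N
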